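-- pv_equiv track=rewrite | github.com/Myplestory/Myplestory | profile_widget.py | short_topic
-- ===== SOURCE A (Python) =====
-- def short_topic(topic: str, max_width: int = 22) -> str:
--     if not topic:
--         return ""
--     if len(topic) <= max_width:
--         return topic
--     parts = topic.split("-")
--     while len(parts) > 1:
--         parts.pop()
--         candidate = "-".join(parts)
--         if len(candidate) <= max_width:
--             return candidate
--     return topic[:max_width]
-- ===== SOURCE B (Python) =====
-- def short_topic(topic: str, max_width: int = 22) -> str:
--     if not topic:
--         return ""
--     if len(topic) <= max_width:
--         return topic
--     parts = topic.split("-")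
--     # Forward scan: cum is the length of "-".join(parts[:i]); lengths grow
--     # strictly, so stop at the first overflow; join once at the end.
--     best = 0
--     cum = len(parts[0])
--     for i in range(1, len(parts)):
--         if cum > max_width:
--             break
--         best = i
--         cum += 1 + len(parts[i])
--     if best:
--         return "-".join(parts[:best])
--     return topic[:max_width]
-- ===== Notes on version B (the rewrite author's own statement) =====
-- stated objective: alternative
-- what changed: Replaces A's backward pop-and-rejoin loop (which rebuilds and measures a joined string after every pop) with a single forward scan that maintains a running integer length of the joined prefix, breaks at the first overflow, and joins once at the end.
import Mathlib
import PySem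

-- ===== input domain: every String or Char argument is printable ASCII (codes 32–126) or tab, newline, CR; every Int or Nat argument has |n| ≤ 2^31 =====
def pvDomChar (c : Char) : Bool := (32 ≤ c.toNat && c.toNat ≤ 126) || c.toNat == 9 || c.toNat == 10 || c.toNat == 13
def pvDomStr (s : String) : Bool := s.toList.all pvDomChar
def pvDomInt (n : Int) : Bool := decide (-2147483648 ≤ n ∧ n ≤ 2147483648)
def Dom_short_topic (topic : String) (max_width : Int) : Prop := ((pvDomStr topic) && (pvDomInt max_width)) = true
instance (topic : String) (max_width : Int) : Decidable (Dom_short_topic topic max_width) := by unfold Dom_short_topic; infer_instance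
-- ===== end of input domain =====

-- B replaces A's backward pop-and-rejoin loop by a forward integer-length scan with one final join; equivalence of return values proved below.

-- ===== PORT A =====
-- A's while loop: pop the last part, rejoin, return the candidate as soon as it fits.
def shortTopicPop (mw : Int) (tl : List Char) (parts : List (List Char)) : List Char :=
  if 1 < parts.length then
    let parts' := parts.dropLast
    let cand := PySem.Chars.join ['-'] parts'
    if (cand.length : Int) ≤ mw then cand
    else shortTopicPop mw tl parts'
  else PySem.Chars.slice tl none (some mw)
termination_by parts.length
decreasing_by simp [List.length_dropLast]; omega

def short_topic (topic : String) (max_width : Int) : String :=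
  let tl := topic.toList
  if tl.isEmpty then ""
  else if (tl.length : Int) ≤ max_width then topic
  else String.ofList (shortTopicPop max_width tl (PySem.Chars.splitOn tl ['-']))

-- ===== PORT B =====
-- B's for loop: cum is the length of "-".join(parts[:i]); break at first overflow.
def shortTopicScan (mw : Int) (parts : List (List Char)) (i : Nat) (cum : Int) (best : Nat) : Nat :=
  if h : i < parts.length then
    if cum > mw then best
    else shortTopicScan mw parts (i + 1) (cum + 1 + (parts[i].length : Int)) i
  else best
termination_by parts.length - i

def short_topic_alt (topic : String) (max_width : Int) : String :=
  let tl := topic.toList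
  if tl.isEmpty then ""
  else if (tl.length : Int) ≤ max_width then topic
  else
    let parts := PySem.Chars.splitOn tl ['-']
    let best := shortTopicScan max_width parts 1 ((parts.headD []).length : Int) 0
    if best ≠ 0 then String.ofList (PySem.Chars.join ['-'] (parts.take best))
    else String.ofList (PySem.Chars.slice tl none (some max_width))

-- ===== PRECONDITION & SPEC =====
def Spec_short_topic (topic : String) (max_width : Int) (out : String) : Prop := out = short_topic_alt topic max_width
instance (topic : String) (max_width : Int) (out : String) : Decidable (Spec_short_topic topic max_width out) := by unfold Spec_short_topic; infer_instance

-- ===== CLAIM (what is proved, stated in full; the proofs are below) =====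
def Claim_equal_short_topic : Prop := ∀ (topic : String) (max_width : Int), Dom_short_topic topic max_width → Spec_short_topic topic max_width (short_topic topic max_width)

-- ===== LEMMAS AND PROOFS =====

-- the length (as Int) of "-".join(parts[:k])
def pvL (parts : List (List Char)) (k : Nat) : Int :=
  ((List.intercalate ['-'] (parts.take k)).length : Int)

-- "k is a fitting proper prefix count"
abbrev pvP (parts : List (List Char)) (mw : Int) (k : Nat) : Prop :=
  1 ≤ k ∧ pvL parts k ≤ mw

lemma pv_splitOn_go_ne_nil (sep : List Char) (fuel : Nat) (l cur : List Char)
    (acc : List (List Char)) : PySem.Chars.splitOn.go sep fuel l cur acc ≠ [] := by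
  induction fuel generalizing l cur acc with
  | zero => simp [PySem.Chars.splitOn.go]
  | succ f ih =>
    cases l with
    | nil => simp [PySem.Chars.splitOn.go]
    | cons c rest =>
      rw [PySem.Chars.splitOn.go]
      split_ifs with hpre
      · exact ih _ _ _
      · exact ih _ _ _

lemma pv_splitOn_ne_nil (l : List Char) : PySem.Chars.splitOn l ['-'] ≠ [] := by
  unfold PySem.Chars.splitOn
  exact pv_splitOn_go_ne_nil _ _ _ _ _

lemma pv_intercalate_append_singleton (sep a : List Char) (xs : List (List Char)) (h : xs ≠ []) :
    List.intercalate sep (xs ++ [a]) = List.intercalate sep xs ++ sep ++ a := by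
  induction xs with
  | nil => exact absurd rfl h
  | cons x t ih =>
    cases t with
    | nil => simp [List.intercalate]
    | cons y u =>
      have hcc : ∀ (p q : List Char) (r : List (List Char)),
          List.intercalate sep (p :: q :: r) = p ++ sep ++ List.intercalate sep (q :: r) := by
        intro p q r; simp [List.intercalate]
      rw [List.cons_append, List.cons_append, hcc, ← List.cons_append,
        ih (by simp), hcc]
      simp [List.append_assoc]

lemma pv_take_succ_eq (parts : List (List Char)) (i : Nat) (h : i < parts.length) :
    parts.take (i + 1) = parts.take i ++ [parts[i]] := by
  rw [List.take_add_one]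
  simp [List.getElem?_eq_getElem h]

lemma pv_L_succ (parts : List (List Char)) (i : Nat) (h1 : 1 ≤ i) (h2 : i < parts.length) :
    pvL parts (i + 1) = pvL parts i + 1 + (parts[i].length : Int) := by
  unfold pvL
  rw [pv_take_succ_eq parts i h2,
    pv_intercalate_append_singleton _ _ _ (by
      intro hnil
      rw [List.take_eq_nil_iff] at hnil
      rcases hnil with h' | h'
      · omega
      · subst h'; simp at h2)]
  simp [List.length_append]
  omega

lemma pv_L_mono (parts : List (List Char)) (i k : Nat) (h1 : 1 ≤ i) (hik : i ≤ k)
    (hk : k ≤ parts.length) : pvL parts i ≤ pvL parts k := by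
  induction k, hik using Nat.le_induction with
  | base => exact le_refl _
  | succ k hik ih =>
    have hkl : k < parts.length := by omega
    have hstep := pv_L_succ parts k (by omega) hkl
    have hpos : (0 : Int) ≤ (parts[k].length : Int) := by positivity
    have := ih (by omega)
    omega

-- characterization of A's loop on a prefix of parts
lemma pv_pop_char (mw : Int) (tl : List Char) (parts : List (List Char)) (m : Nat)
    (h1 : 1 ≤ m) (h2 : m ≤ parts.length) :
    shortTopicPop mw tl (parts.take m) =
      if 1 ≤ Nat.findGreatest (pvP parts mw) (m - 1) then
        List.intercalate ['-'] (parts.take (Nat.findGreatest (pvP parts mw) (m - 1)))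
      else PySem.Chars.slice tl none (some mw) := by
  induction m with
  | zero => omega
  | succ m ih =>
    rcases Nat.eq_zero_or_pos m with hm0 | hm1
    · subst hm0
      rw [shortTopicPop]
      have hlen : (parts.take 1).length = 1 := by
        simp [List.length_take]; omega
      simp [hlen, Nat.findGreatest_zero]
    · -- m ≥ 1
      have hdrop : (parts.take (m + 1)).dropLast = parts.take m := by
        rw [List.dropLast_eq_take, List.take_take]
        congr 1
        simp [List.length_take]
        omega
      have hlen : (parts.take (m + 1)).length = m + 1 := by
        simp [List.length_take]; omega
      rw [shortTopicPop]
      rw [if_pos (by omega : 1 < (parts.take (m + 1)).length)]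
      simp only [hdrop, PySem.Chars.join]
      have hfg : Nat.findGreatest (pvP parts mw) (m + 1 - 1) =
          if pvP parts mw m then m else Nat.findGreatest (pvP parts mw) (m - 1) := by
        have : m = (m - 1) + 1 := by omega
        rw [Nat.add_sub_cancel, this, Nat.findGreatest_succ, ← this]
      by_cases hfit : ((List.intercalate ['-'] (parts.take m)).length : Int) ≤ mw
      · have hP : pvP parts mw m := ⟨hm1, hfit⟩
        rw [if_pos hfit, hfg, if_pos hP]
        rw [if_pos (by omega : 1 ≤ m)]
      · have hP : ¬ pvP parts mw m := fun h => hfit h.2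
        rw [if_neg hfit, hfg, if_neg hP]
        exact ih hm1 (by omega)

-- characterization of B's loop
lemma pv_scan_char (mw : Int) (parts : List (List Char)) (i : Nat)
    (h1 : 1 ≤ i) (h2 : i ≤ parts.length)
    (hfit : ∀ k, 1 ≤ k → k < i → pvL parts k ≤ mw) :
    shortTopicScan mw parts i (pvL parts i) (i - 1) =
      Nat.findGreatest (pvP parts mw) (parts.length - 1) := by
  have H : ∀ d i, 1 ≤ i → i ≤ parts.length → parts.length - i = d →
      (∀ k, 1 ≤ k → k < i → pvL parts k ≤ mw) →
      shortTopicScan mw parts i (pvL parts i) (i - 1) =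
        Nat.findGreatest (pvP parts mw) (parts.length - 1) := by
    intro d
    induction d with
    | zero =>
      intro i hi1 hile hd hfit'
      have hieq : i = parts.length := by omega
      rw [shortTopicScan, dif_neg (by omega)]
      rw [eq_comm, Nat.findGreatest_eq_iff]
      refine ⟨by omega, fun h0 => ⟨by omega, hfit' _ (by omega) (by omega)⟩,
        fun n hn1 hn2 => by omega⟩
    | succ d ihd =>
      intro i hi1 hile hd hfit'
      have hilt : i < parts.length := by omega
      rw [shortTopicScan, dif_pos hilt]
      by_cases hov : pvL parts i > mw
      · rw [if_pos hov]
        rw [eq_comm, Nat.findGreatest_eq_iff]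
        refine ⟨by omega, fun h0 => ⟨by omega, hfit' _ (by omega) (by omega)⟩,
          fun n hn1 hn2 hPn => ?_⟩
        have hmono := pv_L_mono parts i n hi1 (by omega) (by omega)
        exact absurd hPn.2 (by omega)
      · rw [if_neg hov, ← pv_L_succ parts i hi1 hilt]
        have hfit2 : ∀ k, 1 ≤ k → k < i + 1 → pvL parts k ≤ mw := fun k hk1 hk2 => by
          rcases Nat.lt_or_ge k i with hki | hki
          · exact hfit' k hk1 hki
          · have : k = i := by omega
            subst this; omega
        simpa using ihd (i + 1) (by omega) (by omega) (by omega) hfit2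
  exact H (parts.length - i) i h1 h2 rfl hfit

-- ===== VERDICT (by name: the statement is the Claim_ definition above) =====
theorem short_topic_spec : Claim_equal_short_topic := by
  intro topic mw _
  simp only [Spec_short_topic, short_topic, short_topic_alt]
  by_cases hnil : topic.toList.isEmpty = true
  · rw [if_pos hnil, if_pos hnil]
  · rw [if_neg hnil, if_neg hnil]
    by_cases hlen : (topic.toList.length : Int) ≤ mw
    · rw [if_pos hlen, if_pos hlen]
    · rw [if_neg hlen, if_neg hlen]
      have hpne : PySem.Chars.splitOn topic.toList ['-'] ≠ [] := pv_splitOn_ne_nil _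
      set parts := PySem.Chars.splitOn topic.toList ['-'] with hparts
      have hn1 : 0 < parts.length := by
        cases hp : parts with
        | nil => exact absurd hp hpne
        | cons p t => simp
      have hA : shortTopicPop mw topic.toList parts =
          if 1 ≤ Nat.findGreatest (pvP parts mw) (parts.length - 1) then
            List.intercalate ['-'] (parts.take (Nat.findGreatest (pvP parts mw) (parts.length - 1)))
          else PySem.Chars.slice topic.toList none (some mw) := by
        have := pv_pop_char mw topic.toList parts parts.length hn1 (le_refl _)
        rwa [List.take_length] at this
      have hhead : ((parts.headD []).length : Int) = pvL parts 1 := by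
        cases hp : parts with
        | nil => exact absurd hp hpne
        | cons p t => simp [pvL, List.intercalate]
      have hB : shortTopicScan mw parts 1 ((parts.headD []).length : Int) 0 =
          Nat.findGreatest (pvP parts mw) (parts.length - 1) := by
        rw [hhead]
        have := pv_scan_char mw parts 1 (le_refl _) hn1 (fun k hk1 hk2 => by omega)
        simpa using this
      rw [hA, hB]
      set K := Nat.findGreatest (pvP parts mw) (parts.length - 1) with hK
      by_cases hK0 : K = 0
      · rw [if_neg (by omega : ¬ 1 ≤ K), if_neg (by omega : ¬ K ≠ 0)]
      · rw [if_pos (by omega : 1 ≤ K), if_pos (by omega : K ≠ 0)]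
        simp [PySem.Chars.join]
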